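-- pv_equiv track=rewrite | github.com/marjomol/masclet_framework_marco | masclet_framework/particles.py | correct_positive_oripa
-- ===== SOURCE A (Python) =====
-- import collections
--
-- def correct_positive_oripa(oripa, mass):
--     """
--     Corrects a bug in the simulation's ouput, which caused all oripa to be positive.
--     The expected behaviour was that particles which were originally at l=0 retain negative oripa.
--     Args:
--         oripa: np array contaning the directly read (incorrect) oripa for each particle
--         mass: np array containing the mass of each particle
--
--     Returns:
--         corrected oripa array, where particles which originally were at l=0 have negative oripa.
--
--     """
--     dups = collections.defaultdict(list)
--     for i, e in enumerate(oripa):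
--         dups[e].append(i)
--
--     for thisoripa, v in dups.items():
--         if len(v) >= 2:
--             if mass[v[0]] > mass[v[1]]:
--                 oripa[v[0]] = - thisoripa
--             else:
--                 oripa[v[1]] = - thisoripa
--
--     return oripa
-- ===== SOURCE B (Python) =====
-- def correct_positive_oripa(oripa, mass):
--     first_seen = {}
--     done = set()
--     for i, e in enumerate(oripa):
--         if e not in first_seen:
--             first_seen[e] = i
--         elif e not in done:
--             j = first_seen[e]
--             if mass[j] > mass[i]:
--                 oripa[j] = -e
--             else:
--                 oripa[i] = -e
--             done.add(e)
--     return oripa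
-- ===== Notes on version B (the rewrite author's own statement) =====
-- stated objective: alternative
-- what changed: Replaces A's two-phase grouping (build a defaultdict of full index lists, then loop over the groups) by a single interleaved pass over enumerate(oripa) that keeps only each value's first index and a done-set, performing the mass comparison and negation the moment a second occurrence is seen.
import Mathlib
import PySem

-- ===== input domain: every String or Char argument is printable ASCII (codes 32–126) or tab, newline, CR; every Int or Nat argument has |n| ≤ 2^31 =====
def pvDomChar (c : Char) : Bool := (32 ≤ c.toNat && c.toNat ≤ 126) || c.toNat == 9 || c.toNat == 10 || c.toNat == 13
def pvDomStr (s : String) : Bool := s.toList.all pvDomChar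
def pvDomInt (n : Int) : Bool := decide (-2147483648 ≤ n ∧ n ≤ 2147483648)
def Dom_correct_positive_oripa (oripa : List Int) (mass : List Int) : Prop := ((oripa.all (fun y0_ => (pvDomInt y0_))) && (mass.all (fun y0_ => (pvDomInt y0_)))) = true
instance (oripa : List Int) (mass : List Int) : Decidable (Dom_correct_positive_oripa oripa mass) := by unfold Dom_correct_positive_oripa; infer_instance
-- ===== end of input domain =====

-- B replaces A's two-phase defaultdict grouping by a single interleaved scan (first-seen dict +
-- done set, negating at the second occurrence); same O(n) cost, different structure. Both mutate
-- `oripa` identically in Python; the equivalence proved here is about the returned list.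


-- ===== PORT A =====
def correct_positive_oripa (oripa : List Int) (mass : List Int) : List Int :=
  -- dups = defaultdict(list); for i, e in enumerate(oripa): dups[e].append(i)
  let dups : PySem.Dict Int (List Int) :=
    (PySem.List.enumerate oripa).foldl (fun d p => d.modify p.2 [] (fun v => v ++ [p.1])) PySem.Dict.empty
  -- for thisoripa, v in dups.items(): …
  dups.items.foldl (fun out kv =>
    if 2 ≤ kv.2.length then
      if PySem.List.pyGetD mass (PySem.List.pyGetD kv.2 0 0) 0 >
         PySem.List.pyGetD mass (PySem.List.pyGetD kv.2 1 0) 0 then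
        PySem.List.pySetD out (PySem.List.pyGetD kv.2 0 0) (-kv.1)
      else
        PySem.List.pySetD out (PySem.List.pyGetD kv.2 1 0) (-kv.1)
    else out) oripa

-- ===== PORT B =====
def correct_positive_oripa_alt (oripa : List Int) (mass : List Int) : List Int :=
  -- single pass: first_seen = {}; done = set(); for i, e in enumerate(oripa): …
  ((PySem.List.enumerate oripa).foldl (fun st p =>
      if st.2.1.contains p.2 = false then (st.1, st.2.1.insert p.2 p.1, st.2.2)
      else if PySem.Set.contains st.2.2 p.2 = false then
        (if PySem.List.pyGetD mass (st.2.1.getD p.2 0) 0 > PySem.List.pyGetD mass p.1 0 then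
           PySem.List.pySetD st.1 (st.2.1.getD p.2 0) (-p.2)
         else
           PySem.List.pySetD st.1 p.1 (-p.2),
         st.2.1, PySem.Set.add st.2.2 p.2)
      else st)
    (oripa, (PySem.Dict.empty : PySem.Dict Int Int), (PySem.Set.empty : PySem.Set Int))).1

-- ===== PRECONDITION & SPEC =====
-- Pre_ excludes exactly the inputs on which Python A raises IndexError: a duplicated oripa value
-- whose second occurrence indexes past the end of mass (B raises identically there).
def Pre_correct_positive_oripa (oripa : List Int) (mass : List Int) : Prop :=
  ∀ j ∈ List.range oripa.length, ((oripa.take j).count (oripa.getD j 0) = 1 → j < mass.length)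
instance (oripa : List Int) (mass : List Int) : Decidable (Pre_correct_positive_oripa oripa mass) := by
  unfold Pre_correct_positive_oripa; infer_instance
def pvWitness_correct_positive_oripa : List Int × List Int := ([3, 1, 3], [5, 2, 4])

def Spec_correct_positive_oripa (oripa : List Int) (mass : List Int) (out : List Int) : Prop := out = correct_positive_oripa_alt oripa mass
instance (oripa : List Int) (mass : List Int) (out : List Int) : Decidable (Spec_correct_positive_oripa oripa mass out) := by unfold Spec_correct_positive_oripa; infer_instance

-- ===== CLAIM (what is proved, stated in full; the proofs are below) =====
def Claim_equal_correct_positive_oripa : Prop := ∀ (oripa : List Int) (mass : List Int), Dom_correct_positive_oripa oripa mass → Pre_correct_positive_oripa oripa mass → Spec_correct_positive_oripa oripa mass (correct_positive_oripa oripa mass)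

-- ===== LEMMAS AND PROOFS =====

def pvOcc : List Int → Int → Int → List Int
  | [], _, _ => []
  | x :: t, e, s => if x = e then s :: pvOcc t e (s+1) else pvOcc t e (s+1)

lemma pvOcc_append (l t : List Int) (e : Int) (s : Int) :
    pvOcc (l ++ t) e s = pvOcc l e s ++ pvOcc t e (s + l.length) := by
  induction l generalizing s with
  | nil => simp [pvOcc]
  | cons x l ih =>
      simp only [List.cons_append, pvOcc, ih]
      have : s + 1 + (l.length : Int) = s + ((l.length : Int) + 1) := by ring
      split <;> simp [this]

lemma pvOcc_length (l : List Int) (e : Int) (s : Int) :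
    (pvOcc l e s).length = l.count e := by
  induction l generalizing s with
  | nil => simp [pvOcc]
  | cons x l ih => by_cases h : x = e <;> simp [pvOcc, h, ih]

lemma pvOcc_mem (l : List Int) (e : Int) (s i : Int) (h : i ∈ pvOcc l e s) :
    ∃ k : Nat, i = s + k ∧ l[k]? = some e := by
  induction l generalizing s with
  | nil => simp [pvOcc] at h
  | cons x l ih =>
      by_cases hx : x = e
      · simp only [pvOcc, if_pos hx] at h
        rcases List.mem_cons.mp h with h | h
        · exact ⟨0, by simp [h], by simp [hx]⟩
        · rcases ih (s+1) h with ⟨k, hk, hget⟩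
          exact ⟨k+1, by push_cast; omega, by simpa using hget⟩
      · simp only [pvOcc, if_neg hx] at h
        rcases ih (s+1) h with ⟨k, hk, hget⟩
        exact ⟨k+1, by push_cast; omega, by simpa using hget⟩

lemma pvOcc_eq_enum (l : List Int) (e : Int) (s : Int) :
    ((PySem.List.enumerate l s).filter (fun p => p.2 == e)).map (·.1) = pvOcc l e s := by
  induction l generalizing s with
  | nil => simp [pvOcc, PySem.List.enumerate_nil]
  | cons x l ih => by_cases h : x = e <;>
      simp [pvOcc, PySem.List.enumerate_cons, h, ih]

def pvChosen (oripa mass : List Int) (e : Int) : Option Int :=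
  match pvOcc oripa e 0 with
  | i0 :: i1 :: _ => some (if PySem.List.pyGetD mass i0 0 > PySem.List.pyGetD mass i1 0 then i0 else i1)
  | _ => none

def pvStep (oripa mass : List Int) (out : List Int) (k : Int) : List Int :=
  match pvChosen oripa mass k with
  | some i => PySem.List.pySetD out i (-k)
  | none => out

lemma pvDups_getD (oripa : List Int) (e : Int) :
    ((PySem.List.enumerate oripa).foldl
      (fun d p => d.modify p.2 [] (fun v => v ++ [p.1])) PySem.Dict.empty).getD e []
    = pvOcc oripa e 0 := by
  have h1 : (PySem.List.enumerate oripa).foldl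
      (fun d p => d.modify p.2 [] (fun v => v ++ [p.1])) PySem.Dict.empty
    = ((PySem.List.enumerate oripa).map (fun p => (p.2, p.1))).foldl
      (fun d p => d.modify p.1 [] (fun v => v ++ [p.2])) PySem.Dict.empty := by
    rw [List.foldl_map]
  rw [h1, PySem.Dict.getD_foldl_modify_append]
  rw [List.filter_map, List.map_map]
  simpa using pvOcc_eq_enum oripa e 0

lemma pvDups_items (oripa : List Int) :
    ((PySem.List.enumerate oripa).foldl
      (fun d p => d.modify p.2 [] (fun v => v ++ [p.1])) PySem.Dict.empty).items
    = (PySem.Set.ofList oripa).map (fun k => (k, pvOcc oripa k 0)) := by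
  have hnd : ((PySem.List.enumerate oripa).foldl
      (fun d p => d.modify p.2 [] (fun v => v ++ [p.1])) PySem.Dict.empty).keys.Nodup := by
    exact PySem.Dict.nodup_keys_foldl_modify_key (PySem.List.enumerate oripa)
      (fun p : Int × Int => p.2) [] (fun _ x v => v ++ [x.1]) PySem.Dict.empty
      PySem.Dict.nodup_keys_empty
  have hkeys : ((PySem.List.enumerate oripa).foldl
      (fun d p => d.modify p.2 [] (fun v => v ++ [p.1])) PySem.Dict.empty).keys
      = PySem.Set.ofList oripa := by
    rw [PySem.Dict.keys_foldl_modify_key (PySem.List.enumerate oripa)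
      (fun p : Int × Int => p.2) [] (fun _ x v => v ++ [x.1]) PySem.Dict.empty]
    simp [PySem.Dict.keys_empty, PySem.List.map_snd_enumerate, PySem.Set.update_nil_left]
  rw [PySem.Dict.items_eq_map_keys _ hnd [], hkeys]
  exact List.map_congr_left (fun k hk => by rw [pvDups_getD])

lemma pvChosen_mem (oripa mass : List Int) (e i : Int) (h : pvChosen oripa mass e = some i) :
    i ∈ pvOcc oripa e 0 := by
  unfold pvChosen at h
  rcases hocc : pvOcc oripa e 0 with _ | ⟨i0, _ | ⟨i1, t⟩⟩ <;> rw [hocc] at h <;> simp at h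
  · split at h <;> simp_all

lemma pvChosen_getElem (oripa mass : List Int) (e i : Int)
    (h : pvChosen oripa mass e = some i) : ∃ k : Nat, i = k ∧ oripa[k]? = some e := by
  rcases pvOcc_mem oripa e 0 i (pvChosen_mem oripa mass e i h) with ⟨k, hk, hget⟩
  exact ⟨k, by omega, hget⟩

lemma pvChosen_count (oripa mass : List Int) (e i : Int)
    (h : pvChosen oripa mass e = some i) : 2 ≤ oripa.count e := by
  unfold pvChosen at h
  rcases hocc : pvOcc oripa e 0 with _ | ⟨i0, _ | ⟨i1, t⟩⟩ <;> rw [hocc] at h <;> simp at h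
  have := pvOcc_length oripa e 0
  rw [hocc] at this; simp at this; omega

lemma pvStep_length (oripa mass out : List Int) (k : Int) :
    (pvStep oripa mass out k).length = out.length := by
  unfold pvStep
  rcases h : pvChosen oripa mass k with _ | i
  · rfl
  · rcases pvChosen_getElem oripa mass k i h with ⟨n, rfl, _⟩
    simp [PySem.List.pySetD_natCast]

lemma foldl_pvStep_length (oripa mass : List Int) (ks out : List Int) :
    (ks.foldl (pvStep oripa mass) out).length = out.length := by
  induction ks generalizing out with
  | nil => rfl
  | cons k ks ih => rw [List.foldl_cons, ih, pvStep_length]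

lemma foldl_pvStep_getElem (oripa mass : List Int) (ks : List Int) (out : List Int)
    (hlen : out.length = oripa.length) (j : Nat) (hj : j < oripa.length) :
    (ks.foldl (pvStep oripa mass) out)[j]? =
      if oripa[j] ∈ ks ∧ pvChosen oripa mass oripa[j] = some (j : Int)
      then some (-oripa[j]) else out[j]? := by
  induction ks generalizing out with
  | nil => simp
  | cons k ks ih =>
      rw [List.foldl_cons, ih _ (by rw [pvStep_length, hlen])]
      by_cases hk : k = oripa[j]
      · subst hk
        by_cases hc : pvChosen oripa mass oripa[j] = some (j : Int)
        · have hstep : (pvStep oripa mass out oripa[j])[j]? = some (-oripa[j]) := by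
            unfold pvStep; rw [hc]
            simp [PySem.List.pySetD_natCast, hlen, hj]
          by_cases hmem : oripa[j] ∈ ks <;> simp [hmem, hc, hstep]
        · have hstep : (pvStep oripa mass out oripa[j])[j]? = out[j]? := by
            unfold pvStep
            rcases h : pvChosen oripa mass oripa[j] with _ | i
            · rfl
            · rcases pvChosen_getElem oripa mass oripa[j] i h with ⟨n, rfl, _⟩
              have hnj : n ≠ j := by rintro rfl; exact hc h
              simp [PySem.List.pySetD_natCast, List.getElem?_set_ne, hnj]
          simp [hc, hstep]
      · have hstep : (pvStep oripa mass out k)[j]? = out[j]? := by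
          unfold pvStep
          rcases h : pvChosen oripa mass k with _ | i
          · rfl
          · rcases pvChosen_getElem oripa mass k i h with ⟨n, rfl, hget⟩
            have hnj : n ≠ j := by
              rintro rfl
              exact hk (by simpa [List.getElem?_eq_getElem hj] using hget.symm)
            simp [PySem.List.pySetD_natCast, List.getElem?_set_ne, hnj]
        have hmc : (oripa[j] ∈ k :: ks) ↔ (oripa[j] ∈ ks) := by
          simp only [List.mem_cons, or_iff_right_iff_imp]
          intro h; exact absurd h.symm hk
        rw [hstep]
        by_cases hmem : oripa[j] ∈ ks <;> simp [hmc, hmem]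

lemma pvA_eq_foldl (oripa mass : List Int) :
    correct_positive_oripa oripa mass = (PySem.Set.ofList oripa).foldl (pvStep oripa mass) oripa := by
  show ((PySem.List.enumerate oripa).foldl
      (fun d p => d.modify p.2 [] (fun v => v ++ [p.1])) PySem.Dict.empty).items.foldl _ oripa = _
  rw [pvDups_items, List.foldl_map]
  refine PySem.List.foldl_congr_mem _ _ _ _ (fun out k _ => ?_)
  rcases hocc : pvOcc oripa k 0 with _ | ⟨i0, _ | ⟨i1, t⟩⟩ <;>
    simp only [pvStep, pvChosen, hocc] <;> norm_num
  have h1 : PySem.List.pyGetD (i0 :: i1 :: t) 1 0 = i1 := by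
    have := PySem.List.pyGetD_ofNat (xs := i0 :: i1 :: t) (n := 1) (d := 0) (by simp)
    simpa using this
  rw [h1]; split <;> rfl



lemma pvA_length (oripa mass : List Int) :
    (correct_positive_oripa oripa mass).length = oripa.length := by
  rw [pvA_eq_foldl, foldl_pvStep_length]

lemma pvA_getElem (oripa mass : List Int) (j : Nat) (hj : j < oripa.length) :
    (correct_positive_oripa oripa mass)[j]? =
      if pvChosen oripa mass oripa[j] = some (j : Int) then some (-oripa[j]) else some oripa[j] := by
  rw [pvA_eq_foldl, foldl_pvStep_getElem oripa mass _ _ rfl j hj]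
  have hmem : oripa[j] ∈ PySem.Set.ofList oripa :=
    (PySem.Set.mem_ofList _ _).mpr (List.getElem_mem hj)
  simp [hmem, List.getElem?_eq_getElem hj]

def pvStepB (mass : List Int) (st : List Int × PySem.Dict Int Int × PySem.Set Int)
    (p : Int × Int) : List Int × PySem.Dict Int Int × PySem.Set Int :=
  if st.2.1.contains p.2 = false then (st.1, st.2.1.insert p.2 p.1, st.2.2)
  else if PySem.Set.contains st.2.2 p.2 = false then
    (if PySem.List.pyGetD mass (st.2.1.getD p.2 0) 0 > PySem.List.pyGetD mass p.1 0 then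
       PySem.List.pySetD st.1 (st.2.1.getD p.2 0) (-p.2)
     else
       PySem.List.pySetD st.1 p.1 (-p.2),
     st.2.1, PySem.Set.add st.2.2 p.2)
  else st

lemma pvB_eq (oripa mass : List Int) :
    correct_positive_oripa_alt oripa mass =
      ((PySem.List.enumerate oripa).foldl (pvStepB mass)
        (oripa, PySem.Dict.empty, PySem.Set.empty)).1 := rfl

lemma pvOcc_singleton (x e s : Int) : pvOcc [x] e s = if x = e then [s] else [] := by
  by_cases h : x = e <;> simp [pvOcc, h]

lemma pvOcc_take_succ (oripa : List Int) (e : Int) (n : Nat) (hn : n < oripa.length) :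
    pvOcc (oripa.take (n+1)) e 0
      = pvOcc (oripa.take n) e 0 ++ (if oripa[n] = e then [(n : Int)] else []) := by
  rw [List.take_add_one, List.getElem?_eq_getElem hn]
  simp only [Option.toList_some]
  rw [pvOcc_append, pvOcc_singleton]
  simp [List.length_take, Nat.min_eq_left (le_of_lt hn)]

lemma pvOcc_full_split (oripa : List Int) (e : Int) (n : Nat) (hn : n + 1 ≤ oripa.length) :
    pvOcc oripa e 0
      = pvOcc (oripa.take (n+1)) e 0 ++ pvOcc (oripa.drop (n+1)) e ((n : Int) + 1) := by
  conv_lhs => rw [← List.take_append_drop (n+1) oripa]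
  rw [pvOcc_append]
  simp [List.length_take, Nat.min_eq_left hn]

lemma pvCount_take_succ (oripa : List Int) (e : Int) (n : Nat) (hn : n < oripa.length) :
    (oripa.take (n+1)).count e = (oripa.take n).count e + (if oripa[n] = e then 1 else 0) := by
  rw [← pvOcc_length _ _ 0, ← pvOcc_length _ _ 0, pvOcc_take_succ _ _ _ hn, List.length_append]
  split <;> simp

lemma pvB_inv (oripa mass : List Int) (n : Nat) (hn : n ≤ oripa.length) :
    (∀ e : Int,
      ((PySem.List.enumerate (oripa.take n)).foldl (pvStepB mass)
        (oripa, PySem.Dict.empty, PySem.Set.empty)).2.1.get? e = (pvOcc (oripa.take n) e 0).head?)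
    ∧ (∀ e : Int,
      e ∈ ((PySem.List.enumerate (oripa.take n)).foldl (pvStepB mass)
        (oripa, PySem.Dict.empty, PySem.Set.empty)).2.2 ↔ 2 ≤ (oripa.take n).count e)
    ∧ ((PySem.List.enumerate (oripa.take n)).foldl (pvStepB mass)
        (oripa, PySem.Dict.empty, PySem.Set.empty)).1.length = oripa.length
    ∧ (∀ (j : Nat) (hj : j < oripa.length),
      ((PySem.List.enumerate (oripa.take n)).foldl (pvStepB mass)
        (oripa, PySem.Dict.empty, PySem.Set.empty)).1[j]? =
        if 2 ≤ (oripa.take n).count oripa[j] ∧ pvChosen oripa mass oripa[j] = some (j : Int)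
        then some (-oripa[j]) else some oripa[j]) := by
  induction n with
  | zero =>
      refine ⟨?_, ?_, rfl, ?_⟩
      · intro e; simp [pvOcc, PySem.List.enumerate_nil, PySem.Dict.get?_empty]
      · intro e; simp [PySem.List.enumerate_nil, PySem.Set.empty]
      · intro j hj; simp [PySem.List.enumerate_nil, List.getElem?_eq_getElem hj]
  | succ n ih =>
      have hlt : n < oripa.length := by omega
      have hn' : n ≤ oripa.length := by omega
      obtain ⟨hfs, hdone, hlen, hout⟩ := ih hn'
      have htl : (oripa.take n).length = n := by
        rw [List.length_take]; omega
      have hsplit : (PySem.List.enumerate (oripa.take (n+1))).foldl (pvStepB mass)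
            (oripa, PySem.Dict.empty, PySem.Set.empty)
          = pvStepB mass ((PySem.List.enumerate (oripa.take n)).foldl (pvStepB mass)
              (oripa, PySem.Dict.empty, PySem.Set.empty)) ((n : Int), oripa[n]) := by
        rw [List.take_add_one, List.getElem?_eq_getElem hlt]
        simp only [Option.toList_some]
        rw [PySem.List.enumerate_append, List.foldl_append]
        simp [PySem.List.enumerate_cons, PySem.List.enumerate_nil, htl]
      set st := (PySem.List.enumerate (oripa.take n)).foldl (pvStepB mass)
        (oripa, PySem.Dict.empty, PySem.Set.empty) with hst
      rw [hsplit]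
      by_cases hc1 : st.2.1.contains oripa[n] = false
      · -- first occurrence of oripa[n]
        have hget : st.2.1.get? oripa[n] = none := by
          rw [PySem.Dict.contains_eq_isSome_get?] at hc1
          exact Option.not_isSome_iff_eq_none.mp (by simp [hc1])
        have hocc0 : pvOcc (oripa.take n) oripa[n] 0 = [] := by
          have := hfs oripa[n]
          rw [hget] at this
          exact List.head?_eq_none_iff.mp this.symm
        have hcnt0 : (oripa.take n).count oripa[n] = 0 := by
          rw [← pvOcc_length _ _ 0, hocc0]; rfl
        have hstep : pvStepB mass st ((n : Int), oripa[n])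
            = (st.1, st.2.1.insert oripa[n] (n : Int), st.2.2) := by
          simp only [pvStepB]
          rw [if_pos hc1]
        rw [hstep]
        refine ⟨?_, ?_, hlen, ?_⟩
        · intro e
          by_cases he : e = oripa[n]
          · subst he
            rw [PySem.Dict.get?_insert_self, pvOcc_take_succ _ _ _ hlt]
            simp [hocc0]
          · rw [PySem.Dict.get?_insert_of_ne _ _ he, pvOcc_take_succ _ _ _ hlt]
            have : ¬ oripa[n] = e := fun h => he h.symm
            simp [this, hfs e]
        · intro e
          rw [pvCount_take_succ _ _ _ hlt, hdone e]
          by_cases he : oripa[n] = e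
          · subst he; rw [hcnt0]; simp
          · simp [he]
        · intro j hj
          rw [hout j hj, pvCount_take_succ _ _ _ hlt]
          by_cases he : oripa[n] = oripa[j]
          · rw [← he, hcnt0]; simp
          · simp [he]
      · -- oripa[n] already seen
        rw [Bool.not_eq_false] at hc1
        obtain ⟨i0, hi0⟩ : ∃ i0, st.2.1.get? oripa[n] = some i0 := by
          rw [PySem.Dict.contains_eq_isSome_get?] at hc1
          exact Option.isSome_iff_exists.mp hc1
        have hhead : (pvOcc (oripa.take n) oripa[n] 0).head? = some i0 := by
          rw [← hfs oripa[n], hi0]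
        by_cases hc2 : PySem.Set.contains st.2.2 oripa[n] = false
        · -- second occurrence: negate
          have hnotdone : oripa[n] ∉ st.2.2 := by
            intro h
            rw [← PySem.Set.contains_iff] at h
            rw [h] at hc2; cases hc2
          have hcnt1 : (oripa.take n).count oripa[n] = 1 := by
            have hlt2 : ¬ 2 ≤ (oripa.take n).count oripa[n] := fun h => hnotdone ((hdone _).mpr h)
            have hne : pvOcc (oripa.take n) oripa[n] 0 ≠ [] := by
              intro h; rw [h] at hhead; cases hhead
            have h1 : 1 ≤ (pvOcc (oripa.take n) oripa[n] 0).length :=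
              Nat.one_le_iff_ne_zero.mpr (fun h => hne (List.eq_nil_of_length_eq_zero h))
            rw [pvOcc_length] at h1
            omega
          have hocc1 : pvOcc (oripa.take n) oripa[n] 0 = [i0] := by
            have : (pvOcc (oripa.take n) oripa[n] 0).length = 1 := by
              rw [pvOcc_length]; exact hcnt1
            obtain ⟨a, ha⟩ := List.length_eq_one_iff.mp this
            rw [ha] at hhead ⊢
            simpa using hhead
          obtain ⟨k0, hk0e, hk0get⟩ := pvOcc_mem _ _ _ i0 (by rw [hocc1]; exact List.mem_singleton_self i0)
          rw [zero_add] at hk0e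
          have hk0n : k0 < n := by
            by_contra h
            rw [List.getElem?_take_eq_none (by omega)] at hk0get
            cases hk0get
          have hk0len : k0 < oripa.length := by omega
          have hk0val : oripa[k0] = oripa[n] := by
            rw [List.getElem?_take_of_lt hk0n, List.getElem?_eq_getElem hk0len] at hk0get
            exact Option.some.inj hk0get
          have hocc_succ : pvOcc (oripa.take (n+1)) oripa[n] 0 = [i0, (n : Int)] := by
            rw [pvOcc_take_succ _ _ _ hlt, hocc1]; simp
          have hocc_full : ∃ rest, pvOcc oripa oripa[n] 0 = i0 :: (n : Int) :: rest := by
            refine ⟨pvOcc (oripa.drop (n+1)) oripa[n] ((n : Int) + 1), ?_⟩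
            rw [pvOcc_full_split _ _ n (by omega), hocc_succ]; rfl
          obtain ⟨rest, hrest⟩ := hocc_full
          have hchosen : pvChosen oripa mass oripa[n]
              = some (if PySem.List.pyGetD mass i0 0 > PySem.List.pyGetD mass (n : Int) 0
                      then i0 else (n : Int)) := by
            unfold pvChosen; rw [hrest]
          have hgetD : st.2.1.getD oripa[n] 0 = i0 := by
            rw [PySem.Dict.getD_eq_get?_getD, hi0]; rfl
          have hstep : pvStepB mass st ((n : Int), oripa[n])
              = (if PySem.List.pyGetD mass i0 0 > PySem.List.pyGetD mass (n : Int) 0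
                 then PySem.List.pySetD st.1 i0 (-oripa[n])
                 else PySem.List.pySetD st.1 (n : Int) (-oripa[n]),
                 st.2.1, PySem.Set.add st.2.2 oripa[n]) := by
            simp only [pvStepB]
            rw [if_neg (by rw [hc1]; simp), if_pos hc2, hgetD]
          rw [hstep]
          obtain ⟨kstar, hks_eq, hkslen, hksval, hchosen'⟩ :
              ∃ k : Nat, (if PySem.List.pyGetD mass i0 0 > PySem.List.pyGetD mass (n : Int) 0
                then i0 else (n : Int)) = (k : Int) ∧ k < oripa.length ∧ oripa[k]? = some oripa[n] ∧
                pvChosen oripa mass oripa[n] = some ((k : Nat) : Int) := by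
            by_cases hcmp : PySem.List.pyGetD mass i0 0 > PySem.List.pyGetD mass (n : Int) 0
            · exact ⟨k0, by rw [if_pos hcmp]; exact hk0e, hk0len,
                by rw [List.getElem?_eq_getElem hk0len, hk0val],
                by rw [hchosen, if_pos hcmp, hk0e]⟩
            · exact ⟨n, by rw [if_neg hcmp], hlt, List.getElem?_eq_getElem hlt,
                by rw [hchosen, if_neg hcmp]⟩
          have hksval' : oripa[kstar]'hkslen = oripa[n] := by
            rw [List.getElem?_eq_getElem hkslen] at hksval
            exact Option.some.inj hksval
          have hout' : (if PySem.List.pyGetD mass i0 0 > PySem.List.pyGetD mass (n : Int) 0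
                 then PySem.List.pySetD st.1 i0 (-oripa[n])
                 else PySem.List.pySetD st.1 (n : Int) (-oripa[n]))
              = st.1.set kstar (-oripa[n]) := by
            rw [show (if PySem.List.pyGetD mass i0 0 > PySem.List.pyGetD mass (n : Int) 0
                 then PySem.List.pySetD st.1 i0 (-oripa[n])
                 else PySem.List.pySetD st.1 (n : Int) (-oripa[n]))
                = PySem.List.pySetD st.1
                    (if PySem.List.pyGetD mass i0 0 > PySem.List.pyGetD mass (n : Int) 0
                     then i0 else (n : Int)) (-oripa[n]) from by split <;> rfl]
            rw [hks_eq, PySem.List.pySetD_natCast]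
          rw [hout']
          refine ⟨?_, ?_, by simp [hlen], ?_⟩
          · intro e
            rw [pvOcc_take_succ _ _ _ hlt]
            by_cases he : oripa[n] = e
            · rw [← he, hocc1, hi0]; simp
            · simp [he, hfs e]
          · intro e
            rw [pvCount_take_succ _ _ _ hlt]
            by_cases he : oripa[n] = e
            · rw [← he, hcnt1]
              simp [PySem.Set.mem_add]
            · have hne : e ≠ oripa[n] := fun h => he h.symm
              simp [PySem.Set.mem_add, he, hne, hdone e]
          · intro j hj
            by_cases hjk : j = kstar
            · subst hjk
              rw [List.getElem?_set_self (hlen ▸ hkslen)]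
              have h1 : 2 ≤ (oripa.take (n+1)).count (oripa[j]'hkslen) := by
                rw [hksval', pvCount_take_succ _ _ _ hlt, hcnt1]; simp
              have h2 : pvChosen oripa mass (oripa[j]'hkslen) = some ((j : Nat) : Int) := by
                rw [hksval']; exact hchosen'
              rw [if_pos ⟨h1, h2⟩, hksval']
            · rw [List.getElem?_set_ne (fun h => hjk h.symm), hout j hj,
                pvCount_take_succ _ _ _ hlt]
              by_cases he : oripa[n] = oripa[j]
              · rw [← he, hcnt1]
                have hcfalse : ¬ pvChosen oripa mass oripa[n] = some (j : Int) := by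
                  rw [hchosen']
                  intro h
                  exact hjk (by exact_mod_cast (Option.some.inj h).symm)
                simp [hcfalse]
              · simp [he]
        · -- third or later occurrence: no-op
          rw [Bool.not_eq_false] at hc2
          have hdone2 : 2 ≤ (oripa.take n).count oripa[n] :=
            (hdone _).mp ((PySem.Set.contains_iff _ _).mp hc2)
          have hstep : pvStepB mass st ((n : Int), oripa[n]) = st := by
            simp only [pvStepB]
            rw [if_neg (by rw [hc1]; simp), if_neg (by rw [hc2]; simp)]
          rw [hstep]
          have hne : pvOcc (oripa.take n) oripa[n] 0 ≠ [] := by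
            intro h
            have := pvOcc_length (oripa.take n) oripa[n] 0
            rw [h] at this
            simp at this
            omega
          refine ⟨?_, ?_, hlen, ?_⟩
          · intro e
            rw [pvOcc_take_succ _ _ _ hlt]
            by_cases he : oripa[n] = e
            · rw [← he]
              rw [List.head?_append_of_ne_nil _ hne]
              exact hfs oripa[n]
            · simp [he, hfs e]
          · intro e
            rw [pvCount_take_succ _ _ _ hlt, hdone e]
            by_cases he : oripa[n] = e
            · rw [← he, if_pos rfl]
              omega
            · simp [he]
          · intro j hj
            rw [hout j hj, pvCount_take_succ _ _ _ hlt]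
            by_cases he : oripa[n] = oripa[j]
            · rw [← he]
              by_cases hch : pvChosen oripa mass oripa[n] = some (j : Int)
              · rw [if_pos ⟨hdone2, hch⟩, if_pos ⟨by rw [if_pos rfl]; omega, hch⟩]
              · rw [if_neg (fun h => hch h.2), if_neg (fun h => hch h.2)]
            · simp [he]

-- ===== VERDICT (by name: the statement is the Claim_ definition above) =====
theorem correct_positive_oripa_spec : Claim_equal_correct_positive_oripa := by
  intro oripa mass _ _
  unfold Spec_correct_positive_oripa
  obtain ⟨-, -, hlenB, houtB⟩ := pvB_inv oripa mass oripa.length le_rfl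
  rw [List.take_length] at hlenB houtB
  apply List.ext_getElem?
  intro i
  by_cases hi : i < oripa.length
  · rw [pvA_getElem oripa mass i hi, pvB_eq, houtB i hi]
    by_cases hch : pvChosen oripa mass oripa[i] = some (i : Int)
    · rw [if_pos hch, if_pos ⟨pvChosen_count oripa mass oripa[i] _ hch, hch⟩]
    · rw [if_neg hch, if_neg (fun h => hch h.2)]
  · rw [List.getElem?_eq_none (by rw [pvA_length]; omega),
      List.getElem?_eq_none (by rw [pvB_eq, hlenB]; omega)]
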